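-- pv_equiv track=rewrite | github.com/adrianmarino/algorithms | guia/4.3.py | max_plateau
-- ===== SOURCE A (Python) =====
-- def max_plateau(numbers):
--     """
--     Order: O(n)
--     """
--     max_num = None
--     max_count = count = i = 0
--
--     while i < len(numbers):
--         cur_num = numbers[i]
--         next_num = numbers[i + 1] if i + 1 < len(numbers) else None
--
--         count += 1
--
--         if next_num != cur_num:
--             if count > max_count:
--                 max_count = count
--                 max_num = cur_num
--             count = 0
--
--         i += 1
--
--     return max_num, max_count
-- ===== SOURCE B (Python) =====
-- def _merge(L, R, nl, nr):
--     bvl, bll, fvl, pl, lvl, sl = L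
--     bvr, blr, fvr, pr, lvr, sr = R
--     join = (lvl == fvr)
--     bv, bl = bvl, bll
--     if join and sl + pr > bl:
--         bv, bl = fvr, sl + pr
--     if blr > bl:
--         bv, bl = bvr, blr
--     pf = pl + pr if join and pl == nl else pl
--     sf = sr + sl if join and sr == nr else sr
--     return (bv, bl, fvl, pf, lvr, sf)
--
--
-- def _solve(seg):
--     # summary of a nonempty segment:
--     # (best value, best run length, first value, prefix run length, last value, suffix run length)
--     if len(seg) == 1:
--         v = seg[0]
--         return (v, 1, v, 1, v, 1)
--     mid = len(seg) // 2
--     return _merge(_solve(seg[:mid]), _solve(seg[mid:]), mid, len(seg) - mid)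
--
--
-- def max_plateau(numbers):
--     if not numbers:
--         return (None, 0)
--     bv, bl, _, _, _, _ = _solve(numbers)
--     return (bv, bl)
-- ===== Notes on version B (the rewrite author's own statement) =====
-- stated objective: alternative
-- what changed: B replaces A's single left-to-right index walk with a divide-and-conquer recursion: split the list in half, recursively compute (best run, prefix run, suffix run) summaries for each half, and merge them at the boundary, preserving A's first-longest-run tie-breaking.
import Mathlib
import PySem

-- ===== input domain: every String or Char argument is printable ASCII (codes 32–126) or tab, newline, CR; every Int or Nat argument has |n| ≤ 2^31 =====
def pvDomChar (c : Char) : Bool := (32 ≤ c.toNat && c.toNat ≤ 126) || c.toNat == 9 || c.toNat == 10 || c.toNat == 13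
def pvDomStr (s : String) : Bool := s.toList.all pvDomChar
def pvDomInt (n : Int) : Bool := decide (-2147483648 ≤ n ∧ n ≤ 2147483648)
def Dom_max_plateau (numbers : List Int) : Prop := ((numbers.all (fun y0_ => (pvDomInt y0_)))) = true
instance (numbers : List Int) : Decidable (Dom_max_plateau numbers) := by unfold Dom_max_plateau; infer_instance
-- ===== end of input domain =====

-- B replaces A's linear index walk by divide and conquer: split the list in half and merge
-- (best run, prefix run, suffix run) summaries (alternative algorithm; no speed claim).


-- ===== PORT A =====
-- A's while loop over index i, one element per iteration: numbers[i] is the head,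
-- numbers[i+1] (or None) is the head of the rest; state (max_num, max_count, count).
def pvLoopA : List Int → Option Int → Int → Int → Option Int × Int
  | [], max_num, max_count, _ => (max_num, max_count)
  | cur_num :: rest, max_num, max_count, count =>
    let next_num : Option Int := rest.head?
    let count' := count + 1
    if next_num ≠ some cur_num then
      if count' > max_count then pvLoopA rest (some cur_num) count' 0
      else pvLoopA rest max_num max_count 0
    else pvLoopA rest max_num max_count count'

def max_plateau (numbers : List Int) : Option Int × Int :=
  pvLoopA numbers none 0 0

-- ===== PORT B =====
-- B's _merge: combine the summaries of two adjacent nonempty segments (of lengths nl, nr)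
def pvMerge (L R : Int × Int × Int × Int × Int × Int) (nl nr : Int) :
    Int × Int × Int × Int × Int × Int :=
  match L, R with
  | (bvl, bll, fvl, pl, lvl, sl), (bvr, blr, fvr, pr, lvr, sr) =>
    let p1 : Int × Int := if lvl = fvr ∧ sl + pr > bll then (fvr, sl + pr) else (bvl, bll)
    let p2 : Int × Int := if blr > p1.2 then (bvr, blr) else p1
    let pf : Int := if lvl = fvr ∧ pl = nl then pl + pr else pl
    let sf : Int := if lvl = fvr ∧ sr = nr then sr + sl else sr
    (p2.1, p2.2, fvl, pf, lvr, sf)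

-- B's _solve: divide and conquer over the segment (summary of a nonempty segment)
def pvSolve : List Int → Int × Int × Int × Int × Int × Int
  | [] => (0, 0, 0, 0, 0, 0)   -- never reached: B only calls _solve on nonempty segments
  | [v] => (v, 1, v, 1, v, 1)
  | x :: y :: t =>
    let mid := (x :: y :: t).length / 2
    pvMerge (pvSolve ((x :: y :: t).take mid)) (pvSolve ((x :: y :: t).drop mid))
      (mid : Int) (((x :: y :: t).length - mid : Nat) : Int)
termination_by seg => seg.length
decreasing_by
  · simp [List.length_take]; omega
  · simp [List.length_drop]; omega

def max_plateau_alt (numbers : List Int) : Option Int × Int :=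
  match numbers with
  | [] => (none, 0)
  | _ :: _ =>
    let S := pvSolve numbers
    (some S.1, S.2.1)

-- ===== PRECONDITION & SPEC =====
def Spec_max_plateau (numbers : List Int) (out : Option Int × Int) : Prop := out = max_plateau_alt numbers
instance (numbers : List Int) (out : Option Int × Int) : Decidable (Spec_max_plateau numbers out) := by unfold Spec_max_plateau; infer_instance

-- ===== CLAIM (what is proved, stated in full; the proofs are below) =====
def Claim_equal_max_plateau : Prop := ∀ (numbers : List Int), Dom_max_plateau numbers → Spec_max_plateau numbers (max_plateau numbers)

-- ===== LEMMAS AND PROOFS =====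

-- maximal runs of equal adjacent elements, as (value, length) pairs
def pvRuns : List Int → List (Int × Int)
  | [] => []
  | x :: xs =>
    match pvRuns xs with
    | [] => [(x, 1)]
    | (v, k) :: r => if v = x then (x, k + 1) :: r else (x, 1) :: (v, k) :: r

-- "keep the first strictly longer run" step
def pvStep (acc : Option Int × Int) (vl : Int × Int) : Option Int × Int :=
  if vl.2 > acc.2 then (some vl.1, vl.2) else acc

-- add c to the length of the first run (the run A's running counter is in the middle of)
def pvBump (c : Int) : List (Int × Int) → List (Int × Int)
  | [] => []
  | (v, k) :: r => (v, k + c) :: r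

theorem pvBump_zero (l : List (Int × Int)) : pvBump 0 l = l := by
  cases l with
  | nil => rfl
  | cons p r => cases p; simp [pvBump]

theorem pvRuns_cons (x y : Int) (t : List Int) :
    pvRuns (x :: y :: t) =
      match pvRuns (y :: t) with
      | [] => [(x, 1)]
      | (v, k) :: r => if v = x then (x, k + 1) :: r else (x, 1) :: (v, k) :: r := rfl

theorem pvLoopA_cons (x : Int) (rest : List Int) (mn : Option Int) (mc c : Int) :
    pvLoopA (x :: rest) mn mc c =
      if rest.head? ≠ some x then
        if c + 1 > mc then pvLoopA rest (some x) (c + 1) 0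
        else pvLoopA rest mn mc 0
      else pvLoopA rest mn mc (c + 1) := rfl

theorem pvRuns_head (x : Int) (xs : List Int) :
    ∃ k r, pvRuns (x :: xs) = (x, k) :: r := by
  induction xs generalizing x with
  | nil => exact ⟨1, [], rfl⟩
  | cons y t ih =>
    obtain ⟨k, r, h⟩ := ih y
    rw [pvRuns_cons, h]
    by_cases hxy : y = x
    · exact ⟨k + 1, r, by simp [hxy]⟩
    · exact ⟨1, (y, k) :: r, by simp [hxy]⟩

theorem pvLoopA_eq (xs : List Int) :
    ∀ (mn : Option Int) (mc c : Int),
      pvLoopA xs mn mc c = (pvBump c (pvRuns xs)).foldl pvStep (mn, mc) := by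
  induction xs with
  | nil => intro mn mc c; rfl
  | cons x xs ih =>
    intro mn mc c
    cases xs with
    | nil =>
      rw [pvLoopA_cons]
      simp only [List.head?, pvRuns, pvBump, List.foldl, pvStep]
      have h1 : (1 : Int) + c = c + 1 := by ring
      simp [h1]
      split <;> rfl
    | cons y t =>
      obtain ⟨k, r, hruns⟩ := pvRuns_head y t
      have hcons := pvRuns_cons x y t
      simp only [hruns] at hcons
      rw [pvLoopA_cons]
      by_cases hxy : y = x
      · subst hxy
        rw [if_pos rfl] at hcons
        rw [if_neg (by simp), ih, hcons, hruns]
        simp only [pvBump]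
        have : k + (c + 1) = k + 1 + c := by ring
        rw [this]
      · rw [if_neg hxy] at hcons
        have h1 : (1 : Int) + c = c + 1 := by ring
        have hstep : pvStep (mn, mc) (x, 1 + c)
            = if c + 1 > mc then ((some x : Option Int), c + 1) else (mn, mc) := by
          simp [pvStep, h1]
        rw [if_pos (by simp [hxy]), hcons]
        simp only [pvBump]
        rw [ih, ih, pvBump_zero, hruns]
        simp only [List.foldl_cons, hstep]
        split <;> rfl

-- A in terms of runs
theorem max_plateau_eq_fold (numbers : List Int) :
    max_plateau numbers = (pvRuns numbers).foldl pvStep (none, 0) := by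
  unfold max_plateau
  rw [pvLoopA_eq, pvBump_zero]

-- all run lengths are ≥ 1
theorem pvRuns_len_pos (xs : List Int) : ∀ p ∈ pvRuns xs, 1 ≤ p.2 := by
  induction xs with
  | nil => intro p hp; simp [pvRuns] at hp
  | cons x xs ih =>
    intro p hp
    rw [show pvRuns (x :: xs) = _ from rfl] at hp
    cases hrx : pvRuns xs with
    | nil => simp [pvRuns, hrx] at hp; simp [hp]
    | cons q r =>
      obtain ⟨v, k⟩ := q
      have hk : (1 : Int) ≤ k := ih (v, k) (by rw [hrx]; exact List.mem_cons_self)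
      simp only [pvRuns, hrx] at hp
      by_cases hvx : v = x
      · simp [hvx] at hp
        rcases hp with h | h
        · subst h; simpa using by omega
        · exact ih p (by rw [hrx]; exact List.mem_cons_of_mem _ h)
      · simp [hvx] at hp
        rcases hp with h | h | h
        · subst h; norm_num
        · subst h; exact hk
        · exact ih p (by rw [hrx]; exact List.mem_cons_of_mem _ h)

theorem pvRuns_nil_iff (xs : List Int) : pvRuns xs = [] ↔ xs = [] := by
  cases xs with
  | nil => simp [pvRuns]
  | cons x t =>
    obtain ⟨k, r, h⟩ := pvRuns_head x t
    simp [h]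

-- run lengths sum to the list length
theorem pvRuns_sum (xs : List Int) :
    ((pvRuns xs).map Prod.snd).sum = (xs.length : Int) := by
  induction xs with
  | nil => simp [pvRuns]
  | cons x xs ih =>
    cases hrx : pvRuns xs with
    | nil =>
      have hx : xs = [] := (pvRuns_nil_iff xs).mp hrx
      subst hx; simp [pvRuns]
    | cons q r =>
      obtain ⟨v, k⟩ := q
      rw [hrx] at ih
      simp only [pvRuns, hrx]
      by_cases hvx : v = x
      · simp [hvx] at ih ⊢; omega
      · simp [hvx] at ih ⊢; omega


-- glue two run lists at the boundary
def pvGlue : List (Int × Int) → List (Int × Int) → List (Int × Int)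
  | [], b => b
  | [(v, k)], b =>
    match b with
    | [] => [(v, k)]
    | (w, j) :: b' => if v = w then (v, k + j) :: b' else (v, k) :: (w, j) :: b'
  | p :: q :: a, b => p :: pvGlue (q :: a) b

theorem pvGlue_nil_right (a : List (Int × Int)) : pvGlue a [] = a := by
  induction a with
  | nil => rfl
  | cons p a ih =>
    cases a with
    | nil => obtain ⟨v, k⟩ := p; rfl
    | cons q r => simp [pvGlue, ih]

theorem pvGlue_head (v : Int) (k : Int) (a b : List (Int × Int)) :
    ∃ K r, pvGlue ((v, k) :: a) b = (v, K) :: r := by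
  cases a with
  | nil =>
    cases b with
    | nil => exact ⟨k, [], rfl⟩
    | cons q b' =>
      obtain ⟨w, j⟩ := q
      by_cases h : v = w
      · exact ⟨k + j, b', by simp [pvGlue, h]⟩
      · exact ⟨k, (w, j) :: b', by simp [pvGlue, h]⟩
  | cons q a' => exact ⟨k, pvGlue (q :: a') b, rfl⟩

theorem pvRuns_append (l r : List Int) :
    pvRuns (l ++ r) = pvGlue (pvRuns l) (pvRuns r) := by
  induction l with
  | nil => rfl
  | cons x l ih =>
    cases l with
    | nil =>
      cases hr : pvRuns r with
      | nil =>
        have : r = [] := (pvRuns_nil_iff r).mp hr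
        subst this; simp [pvRuns, pvGlue]
      | cons q b' =>
        obtain ⟨w, j⟩ := q
        cases r with
        | nil => simp [pvRuns] at hr
        | cons z s =>
          simp only [List.singleton_append, pvRuns_cons, hr]
          by_cases h : w = x
          · subst h
            have h1 : (1 : Int) + j = j + 1 := by ring
            simp [pvRuns, pvGlue, h1]
          · have h' : x ≠ w := fun hh => h hh.symm
            simp [pvRuns, pvGlue, h, h']
    | cons y t =>
      obtain ⟨k, rest, hruns⟩ := pvRuns_head y t
      have hcons : pvRuns (x :: ((y :: t) ++ r)) =
          match pvRuns ((y :: t) ++ r) with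
          | [] => [(x, 1)]
          | (v, K) :: R => if v = x then (x, K + 1) :: R else (x, 1) :: (v, K) :: R := rfl
      rw [show (x :: y :: t) ++ r = x :: ((y :: t) ++ r) from rfl, hcons, ih, hruns]
      obtain ⟨K, R, hglue⟩ := pvGlue_head y k rest (pvRuns r)
      rw [hglue]
      by_cases hxy : y = x
      · subst hxy
        simp only [pvRuns_cons, hruns]
        -- RHS: pvGlue ((y,k+1) :: rest) (pvRuns r)
        cases rest with
        | nil =>
          -- pvRuns (y::t) = [(y,k)]; pvGlue [(y,k)] b merged
          cases hb : pvRuns r with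
          | nil =>
            rw [hb, pvGlue_nil_right] at hglue
            injection hglue with h1 h2
            injection h1 with h1a h1b
            subst h1b; subst h2
            simp [pvGlue_nil_right]
          | cons q b' =>
            obtain ⟨w, j⟩ := q
            by_cases hw : y = w
            · simp [pvGlue, hb, hw] at hglue ⊢
              obtain ⟨hK, hR⟩ := hglue
              subst hK; subst hR; constructor; omega; rfl
            · simp [pvGlue, hb, hw] at hglue ⊢
              obtain ⟨hK, hR⟩ := hglue
              subst hK; subst hR; exact ⟨rfl, rfl⟩
        | cons q rest' =>
          -- pvGlue has ≥2 elements on the left: head passes through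
          simp only [pvGlue] at hglue ⊢
          injection hglue with h1 h2
          injection h1 with h1a h1b
          subst h1b; subst h2
          rfl
      · simp only [pvRuns_cons, hruns, if_neg hxy]
        -- RHS: pvGlue ((x,1) :: (y,k) :: rest) b = (x,1) :: pvGlue ((y,k)::rest) b
        simp only [pvGlue]
        rw [hglue]

theorem pvStep_snd_mono (s : Option Int × Int) (p : Int × Int) :
    s.2 ≤ (pvStep s p).2 := by
  unfold pvStep; split_ifs with h
  · omega
  · exact le_refl _

theorem foldl_pvStep_snd_nonneg (b : List (Int × Int)) (s : Option Int × Int)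
    (hs : 0 ≤ s.2) : 0 ≤ (b.foldl pvStep s).2 := by
  induction b generalizing s with
  | nil => exact hs
  | cons p b ih => exact ih _ (le_trans hs (pvStep_snd_mono s p))

-- folding from any state s (with 0 ≤ s.2) over runs with lengths ≥ 1:
-- either the segment's own first-max beats s, or s survives
theorem foldl_pvStep_abs (b : List (Int × Int)) (hb : ∀ p ∈ b, 1 ≤ p.2) :
    ∀ s : Option Int × Int, 0 ≤ s.2 →
      b.foldl pvStep s =
        if (b.foldl pvStep (none, 0)).2 > s.2 then b.foldl pvStep (none, 0) else s := by
  induction b with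
  | nil => intro s hs; simp; omega
  | cons p b ih =>
    obtain ⟨w, j⟩ := p
    intro s hs
    obtain ⟨s1, s2⟩ := s
    have hj : 1 ≤ j := hb (w, j) List.mem_cons_self
    have hb' : ∀ p ∈ b, 1 ≤ p.2 := fun p hp => hb p (List.mem_cons_of_mem _ hp)
    have hstep0 : pvStep (none, 0) (w, j) = (some w, j) := by simp [pvStep]; omega
    simp only [List.foldl_cons, hstep0]
    rcases hFe : List.foldl pvStep (none, 0) b with ⟨F1, F2⟩
    have hF0 : (0:Int) ≤ F2 := by
      have := foldl_pvStep_snd_nonneg b (none, 0) (by simp)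
      rw [hFe] at this; exact this
    have h1 := ih hb' (some w, j) (by simp; omega)
    have h2 := ih hb' (s1, s2) hs
    rw [hFe] at h1 h2
    have hsw : pvStep (s1, s2) (w, j) = if j > s2 then ((some w : Option Int), j) else (s1, s2) := rfl
    rw [hsw]
    by_cases hjs : j > s2
    · rw [if_pos hjs, h1]
      dsimp only
      rcases lt_or_ge j F2 with hf | hf
      · rw [if_pos hf]
        split_ifs <;> first | rfl | omega
      · rw [if_neg (not_lt.mpr hf)]
        split_ifs <;> rfl
    · rw [if_neg hjs, h1, h2]
      dsimp only
      rcases lt_or_ge j F2 with hf | hf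
      · rw [if_pos hf]
      · rw [if_neg (not_lt.mpr hf)]
        split_ifs <;> first | rfl | omega

-- the arithmetic heart of the merge, join case
theorem pvMerge_fold_join (A1 : Option Int) (A2 : Int) (F1 : Option Int) (F2 : Int)
    (v k j : Int) (hk : 1 ≤ k) (hj : 1 ≤ j) (hA : 0 ≤ A2) (hF : 0 ≤ F2) :
    (if F2 > (pvStep (A1, A2) (v, k + j)).2 then ((F1, F2) : Option Int × Int) else pvStep (A1, A2) (v, k + j))
      = (if (if F2 > j then ((F1, F2) : Option Int × Int) else ((some v : Option Int), j)).2 >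
            (if k + j > (pvStep (A1, A2) (v, k)).2 then ((some v : Option Int), k + j)
             else pvStep (A1, A2) (v, k)).2
         then (if F2 > j then ((F1, F2) : Option Int × Int) else ((some v : Option Int), j))
         else (if k + j > (pvStep (A1, A2) (v, k)).2 then ((some v : Option Int), k + j)
               else pvStep (A1, A2) (v, k))) := by
  simp only [pvStep]
  split_ifs <;> first | rfl | (exfalso; simp_all; omega)

-- lengths ≥ 1 implies the length of a run list is at most the sum of its lengths
theorem sum_nonneg_of_one_le (L : List (Int × Int)) (h : ∀ p ∈ L, 1 ≤ p.2) :
    0 ≤ (L.map Prod.snd).sum := by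
  induction L with
  | nil => simp
  | cons p r ih =>
    have h1 : 1 ≤ p.2 := h p List.mem_cons_self
    have h2 := ih (fun q hq => h q (List.mem_cons_of_mem _ hq))
    simp; omega

theorem sum_ge_one (L : List (Int × Int)) (h : ∀ p ∈ L, 1 ≤ p.2) (hne : L ≠ []) :
    1 ≤ (L.map Prod.snd).sum := by
  cases L with
  | nil => exact absurd rfl hne
  | cons p r =>
    have h1 : 1 ≤ p.2 := h p List.mem_cons_self
    have h2 := sum_nonneg_of_one_le r (fun q hq => h q (List.mem_cons_of_mem _ hq))
    simp; omega

theorem pvGlue_cons_of_ne_nil (p : Int × Int) (a b : List (Int × Int)) (ha : a ≠ []) :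
    pvGlue (p :: a) b = p :: pvGlue a b := by
  cases a with
  | nil => exact absurd rfl ha
  | cons q a' => obtain ⟨v, k⟩ := p; rfl

theorem pvGlue_concat (a' : List (Int × Int)) (v k w j : Int) (b' : List (Int × Int)) :
    pvGlue (a' ++ [(v, k)]) ((w, j) :: b') =
      if v = w then a' ++ ((v, k + j) :: b') else a' ++ ((v, k) :: (w, j) :: b') := by
  induction a' with
  | nil => simp [pvGlue]
  | cons p a'' ih =>
    rw [List.cons_append, pvGlue_cons_of_ne_nil p _ _ (by simp), ih]
    by_cases h : v = w <;> simp [h]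

theorem pvRuns_head_len (xs : List Int) (f p : Int) (rest : List (Int × Int))
    (h : pvRuns xs = (f, p) :: rest) : rest = [] ↔ p = (xs.length : Int) := by
  have hsum := pvRuns_sum xs
  rw [h, List.map_cons, List.sum_cons] at hsum
  constructor
  · intro hr; subst hr; simp at hsum; omega
  · intro hp
    by_contra hr
    have h1 := sum_ge_one rest
      (fun q hq => pvRuns_len_pos xs q (by rw [h]; exact List.mem_cons_of_mem _ hq)) hr
    simp at hsum; omega

theorem pvRuns_last_len (xs : List Int) (v k : Int) (a' : List (Int × Int))
    (h : pvRuns xs = a' ++ [(v, k)]) : a' = [] ↔ k = (xs.length : Int) := by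
  have hsum := pvRuns_sum xs
  rw [h, List.map_append, List.sum_append] at hsum
  constructor
  · intro hr; subst hr; simp at hsum; omega
  · intro hk
    by_contra hr
    have h1 := sum_ge_one a'
      (fun q hq => pvRuns_len_pos xs q (by rw [h]; exact List.mem_append_left _ hq)) hr
    simp at hsum; omega

-- (1) correctness invariant for pvSolve
theorem pvSolve_inv : ∀ (seg : List Int), seg ≠ [] →
    (pvRuns seg).foldl pvStep (none, 0) = (some (pvSolve seg).1, (pvSolve seg).2.1)
    ∧ (pvRuns seg).head? = some ((pvSolve seg).2.2.1, (pvSolve seg).2.2.2.1)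
    ∧ (pvRuns seg).getLast? = some ((pvSolve seg).2.2.2.2.1, (pvSolve seg).2.2.2.2.2) := by
  intro seg
  induction seg using pvSolve.induct with
  | case1 => intro h; exact absurd rfl h
  | case2 v =>
    intro _
    rw [pvSolve]
    refine ⟨?_, rfl, rfl⟩
    simp [pvRuns, pvStep]
  | case3 x y t midv ih1 ih2 =>
    intro _
    have hmidv : midv = (x :: y :: t).length / 2 := rfl
    clear_value midv
    subst hmidv
    rw [pvSolve]
    set s0 : List Int := x :: y :: t with hs0
    set mid : Nat := s0.length / 2 with hmid
    set l : List Int := s0.take mid with hldef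
    set r : List Int := s0.drop mid with hrdef
    have hs0len : 2 ≤ s0.length := by rw [hs0]; simp
    have hmid1 : 1 ≤ mid := by rw [hmid]; omega
    have hmidlt : mid < s0.length := by rw [hmid]; omega
    have hllen : l.length = mid := by
      rw [hldef]; simp [List.length_take]; omega
    have hrlen : r.length = s0.length - mid := by
      rw [hrdef]; simp [List.length_drop]
    have hl_ne : l ≠ [] := by
      intro h; rw [h] at hllen; simp at hllen; omega
    have hr_ne : r ≠ [] := by
      intro h; rw [h] at hrlen; simp at hrlen; omega
    have hlr : l ++ r = s0 := List.take_append_drop mid s0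
    obtain ⟨hLfold, hLhead, hLlast⟩ := ih1 hl_ne
    obtain ⟨hRfold, hRhead, hRlast⟩ := ih2 hr_ne
    rcases hS_l : pvSolve l with ⟨bvl, bll, fvl, pl, lvl, sl⟩
    rcases hS_r : pvSolve r with ⟨bvr, blr, fvr, pr, lvr, sr⟩
    rw [hS_l] at hLfold hLhead hLlast
    rw [hS_r] at hRfold hRhead hRlast
    dsimp only at hLfold hLhead hLlast hRfold hRhead hRlast
    -- runs of the halves
    have hrl_ne : pvRuns l ≠ [] := fun h => hl_ne ((pvRuns_nil_iff l).mp h)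
    have hrr_ne : pvRuns r ≠ [] := fun h => hr_ne ((pvRuns_nil_iff r).mp h)
    have hgl : (pvRuns l).getLast hrl_ne = (lvl, sl) := by
      rw [List.getLast?_eq_some_getLast hrl_ne] at hLlast
      exact Option.some.inj hLlast
    have hrl_dec : (pvRuns l).dropLast ++ [(lvl, sl)] = pvRuns l := by
      rw [← hgl]; exact List.dropLast_append_getLast hrl_ne
    obtain ⟨q, b', hrr⟩ : ∃ q b', pvRuns r = q :: b' := by
      cases h : pvRuns r with
      | nil => exact absurd h hrr_ne
      | cons q b' => exact ⟨q, b', rfl⟩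
    have hq : q = (fvr, pr) := by
      rw [hrr] at hRhead; exact Option.some.inj hRhead
    subst hq
    -- glue decomposition
    have hGlue : pvRuns s0 = pvGlue (pvRuns l) (pvRuns r) := by
      rw [← hlr, pvRuns_append]
    have hG2 : pvGlue (pvRuns l) (pvRuns r) =
        if lvl = fvr then (pvRuns l).dropLast ++ ((lvl, sl + pr) :: b')
        else (pvRuns l).dropLast ++ ((lvl, sl) :: (fvr, pr) :: b') := by
      rw [← hrl_dec, hrr, pvGlue_concat]
      by_cases h : lvl = fvr <;> simp [h]
    -- positivity facts
    have hsl1 : 1 ≤ sl := by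
      have : (lvl, sl) ∈ pvRuns l := by
        rw [← hrl_dec]; exact List.mem_append_right _ List.mem_cons_self
      exact pvRuns_len_pos l _ this
    have hpr1 : 1 ≤ pr := by
      have : (fvr, pr) ∈ pvRuns r := by rw [hrr]; exact List.mem_cons_self
      exact pvRuns_len_pos r _ this
    have ha'pos : ∀ p ∈ (pvRuns l).dropLast, 1 ≤ p.2 := fun p hp =>
      pvRuns_len_pos l p (by rw [← hrl_dec]; exact List.mem_append_left _ hp)
    have hb'pos : ∀ p ∈ b', 1 ≤ p.2 := fun p hp =>
      pvRuns_len_pos r p (by rw [hrr]; exact List.mem_cons_of_mem _ hp)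
    have hrrpos : ∀ p ∈ pvRuns r, 1 ≤ p.2 := fun p hp => pvRuns_len_pos r p hp
    -- partial folds
    rcases hA0 : List.foldl pvStep (none, 0) (pvRuns l).dropLast with ⟨A1, A2⟩
    rcases hF : List.foldl pvStep (none, 0) b' with ⟨F1, F2⟩
    have hA2 : 0 ≤ A2 := by
      have := foldl_pvStep_snd_nonneg (pvRuns l).dropLast (none, 0) (by simp)
      rw [hA0] at this; exact this
    have hF2 : 0 ≤ F2 := by
      have := foldl_pvStep_snd_nonneg b' (none, 0) (by simp)
      rw [hF] at this; exact this
    have hBl : pvStep (A1, A2) (lvl, sl) = (some bvl, bll) := by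
      rw [← hLfold, ← hrl_dec, List.foldl_append, hA0]; rfl
    have hbll : 0 ≤ bll := by
      have h0 := foldl_pvStep_snd_nonneg (pvRuns l) (none, 0) (by simp)
      rw [hLfold] at h0; exact h0
    have hBr : (if F2 > pr then ((F1, F2) : Option Int × Int) else (some fvr, pr))
        = (some bvr, blr) := by
      rw [← hRfold, hrr]
      simp only [List.foldl_cons]
      have h1 : pvStep (none, 0) (fvr, pr) = (some fvr, pr) := by
        simp [pvStep]; omega
      rw [h1, foldl_pvStep_abs b' hb'pos (some fvr, pr) (by dsimp; omega), hF]
    -- simplify the pvMerge goal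
    simp only [pvMerge]
    rw [hGlue, hG2]
    by_cases hjoin : lvl = fvr
    · -- the two halves join at the boundary
      rw [if_pos hjoin]
      subst hjoin
      refine ⟨?_, ?_, ?_⟩
      · -- fold component
        rw [List.foldl_append, hA0]
        simp only [List.foldl_cons]
        rw [foldl_pvStep_abs b' hb'pos (pvStep (A1, A2) (lvl, sl + pr))
              (le_trans hA2 (pvStep_snd_mono _ _)), hF]
        rw [pvMerge_fold_join A1 A2 F1 F2 lvl sl pr hsl1 hpr1 hA2 hF2]
        rw [hBl, hBr]
        simp only [true_and]
        try dsimp only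
        by_cases h1 : sl + pr > bll
        · rw [if_pos h1, if_pos h1]
          dsimp only
          by_cases h2 : blr > sl + pr
          · rw [if_pos h2, if_pos h2]
          · rw [if_neg h2, if_neg h2]
        · rw [if_neg h1, if_neg h1]
          dsimp only
          by_cases h2 : blr > bll
          · rw [if_pos h2, if_pos h2]
          · rw [if_neg h2, if_neg h2]
      · -- head component
        simp only [true_and]
        cases ha' : (pvRuns l).dropLast with
        | nil =>
          have hrl_single : pvRuns l = [(lvl, sl)] := by
            rw [← hrl_dec, ha']; rfl
          have hfp : fvl = lvl ∧ pl = sl := by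
            rw [hrl_single] at hLhead
            have := Option.some.inj hLhead
            exact ⟨congrArg Prod.fst this.symm, congrArg Prod.snd this.symm⟩
          have hpl_mid : pl = (mid : Int) := by
            have := (pvRuns_last_len l lvl sl [] (by simpa using hrl_single)).mp rfl
            rw [hllen] at this
            omega
          simp only [List.nil_append, List.head?_cons]
          rw [if_pos hpl_mid]
          obtain ⟨h1, h2⟩ := hfp
          rw [h1, h2]
        | cons p a'' =>
          have hrl_cons : pvRuns l = p :: (a'' ++ [(lvl, sl)]) := by
            rw [← hrl_dec, ha']; rfl
          have hp : p = (fvl, pl) := by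
            rw [hrl_cons] at hLhead
            exact Option.some.inj hLhead
          have hpl_ne : pl ≠ (mid : Int) := by
            intro hc
            have := (pvRuns_head_len l fvl pl (a'' ++ [(lvl, sl)]) (by rw [hrl_cons, hp])).mpr
              (by rw [hllen]; exact hc)
            simp at this
          rw [hp]
          simp only [List.cons_append, List.head?_cons]
          rw [if_neg hpl_ne]
      · -- last component
        simp only [true_and]
        cases b' with
        | nil =>
          have hrr_single : pvRuns r = [(lvl, pr)] := by rw [hrr]
          have hls : lvr = lvl ∧ sr = pr := by
            rw [hrr_single] at hRlast
            have := Option.some.inj hRlast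
            exact ⟨congrArg Prod.fst this.symm, congrArg Prod.snd this.symm⟩
          have hsr_nr : sr = ((s0.length - mid : Nat) : Int) := by
            have := (pvRuns_last_len r lvl pr [] (by simpa using hrr_single)).mp rfl
            rw [hrlen] at this
            omega
          rw [List.getLast?_concat]
          rw [if_pos hsr_nr]
          obtain ⟨h1, h2⟩ := hls
          rw [h1, h2]
          have h3 : sl + pr = pr + sl := by ring
          rw [h3]
        | cons p2 b'' =>
          have hglast : ((pvRuns l).dropLast ++ ((lvl, sl + pr) :: p2 :: b'')).getLast?
              = (p2 :: b'').getLast? := by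
            rw [List.getLast?_append_of_ne_nil _ (by simp)]
            exact List.getLast?_append_of_ne_nil [(lvl, sl + pr)] (by simp)
          rw [hglast]
          have hrrlast : (p2 :: b'').getLast? = some (lvr, sr) := by
            rw [hrr] at hRlast
            rw [← hRlast]
            exact (List.getLast?_append_of_ne_nil [(lvl, pr)] (by simp)).symm
          rw [hrrlast]
          have hsr_ne : sr ≠ ((s0.length - mid : Nat) : Int) := by
            intro hc
            have h3 : (p2 :: b'') ≠ [] := by simp
            have h4 : (p2 :: b'').getLast h3 = (lvr, sr) := by
              rw [List.getLast?_eq_some_getLast h3] at hrrlast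
              exact Option.some.inj hrrlast
            have hdec : pvRuns r = ((lvl, pr) :: (p2 :: b'').dropLast) ++ [(lvr, sr)] := by
              rw [hrr, ← h4]
              simp [List.dropLast_append_getLast h3]
            have := (pvRuns_last_len r lvr sr _ hdec).mpr (by rw [hrlen]; exact hc)
            simp at this
          rw [if_neg hsr_ne]
    · -- no join at the boundary
      rw [if_neg hjoin]
      have hsplit : (pvRuns l).dropLast ++ ((lvl, sl) :: (fvr, pr) :: b')
          = pvRuns l ++ pvRuns r := by
        rw [← hrl_dec, hrr]
        simp
      rw [hsplit]
      refine ⟨?_, ?_, ?_⟩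
      · rw [List.foldl_append, hLfold,
            foldl_pvStep_abs (pvRuns r) hrrpos (some bvl, bll) (by dsimp; omega), hRfold]
        dsimp only
        simp only [if_neg (fun hc : lvl = fvr ∧ sl + pr > bll => hjoin hc.1)]
        by_cases h2 : blr > bll
        · rw [if_pos h2, if_pos h2]
        · rw [if_neg h2, if_neg h2]
      · cases hrl2 : pvRuns l with
        | nil => exact absurd hrl2 hrl_ne
        | cons p a'' =>
          rw [hrl2] at hLhead
          simp only [List.cons_append, List.head?_cons]
          rw [if_neg (fun hc : lvl = fvr ∧ pl = (mid : Int) => hjoin hc.1)]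
          rw [List.head?_cons] at hLhead
          rw [hLhead]
      · rw [List.getLast?_append_of_ne_nil _ hrr_ne, hRlast]
        rw [if_neg (fun hc : lvl = fvr ∧ sr = ((s0.length - mid : Nat) : Int) => hjoin hc.1)]

theorem max_plateau_spec : Claim_equal_max_plateau := by
  intro numbers _
  unfold Spec_max_plateau
  rw [max_plateau_eq_fold]
  cases numbers with
  | nil => rfl
  | cons x t =>
    obtain ⟨hfold, _, _⟩ := pvSolve_inv (x :: t) (by simp)
    rw [hfold]
    rfl
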